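-- pv_equiv track=rewrite | github.com/Whiplashzeb/relation_extraction_edition2 | extraction/statistics.py | contain_entity
-- ===== SOURCE A (Python) =====
-- def contain_entity(sentence):
--     sentence = sentence.split()
--
--     contain_chemical = False
--     contain_disease = False
--
--     for word in sentence:
--         if "C_D" in word or "C_C" in word:
--             contain_chemical = True
--         if "D_D" in word or "D_C" in word:
--             contain_disease = True
--
--     if (contain_chemical and (not contain_disease)) or ((not contain_chemical) and contain_disease):
--         return True
--     else:
--         return False
-- ===== SOURCE B (Python) =====
-- def contain_entity(sentence):
--     # No per-word loop: the markers contain no whitespace, so a marker occurs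
--     # in some whitespace-delimited word iff it occurs in the whole string.
--     chem = "C_D" in sentence or "C_C" in sentence
--     dis = "D_D" in sentence or "D_C" in sentence
--     return chem != dis
-- ===== Notes on version B (the rewrite author's own statement) =====
-- stated objective: simpler
-- what changed: Drops the split-into-words loop with two mutable flags: since no marker contains whitespace, B tests the four markers as substrings of the whole string and returns the boolean XOR of the two flags.
import Mathlib
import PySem

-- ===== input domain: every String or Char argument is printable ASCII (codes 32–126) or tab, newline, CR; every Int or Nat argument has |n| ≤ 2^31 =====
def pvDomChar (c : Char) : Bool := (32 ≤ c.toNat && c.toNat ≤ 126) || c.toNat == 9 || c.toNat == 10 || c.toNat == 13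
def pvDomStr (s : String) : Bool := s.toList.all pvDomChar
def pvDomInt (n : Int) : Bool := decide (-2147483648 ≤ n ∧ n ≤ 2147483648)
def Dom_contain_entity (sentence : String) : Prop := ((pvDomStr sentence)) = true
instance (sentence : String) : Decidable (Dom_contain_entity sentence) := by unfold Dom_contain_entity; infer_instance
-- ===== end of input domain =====

-- B replaces A's per-word loop with four whole-string substring tests and a boolean XOR
-- (valid because no marker contains whitespace); objective: simpler.

-- ===== PORT A =====
def contain_entity (sentence : String) : Bool :=
  let words := PySem.Str.split₀ sentence
  let st := words.foldl (fun (st : Bool × Bool) word =>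
    let st1 := if PySem.Str.isIn "C_D" word || PySem.Str.isIn "C_C" word then (true, st.2) else st
    if PySem.Str.isIn "D_D" word || PySem.Str.isIn "D_C" word then (st1.1, true) else st1)
    (false, false)
  if (st.1 && !st.2) || (!st.1 && st.2) then true else false

-- ===== PORT B =====
def contain_entity_alt (sentence : String) : Bool :=
  let chem := PySem.Str.isIn "C_D" sentence || PySem.Str.isIn "C_C" sentence
  let dis := PySem.Str.isIn "D_D" sentence || PySem.Str.isIn "D_C" sentence
  chem != dis

-- ===== PRECONDITION & SPEC =====
def Spec_contain_entity (sentence : String) (out : Bool) : Prop := out = contain_entity_alt sentence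
instance (sentence : String) (out : Bool) : Decidable (Spec_contain_entity sentence out) := by unfold Spec_contain_entity; infer_instance

-- ===== CLAIM (what is proved, stated in full; the proofs are below) =====
def Claim_equal_contain_entity : Prop := ∀ (sentence : String), Dom_contain_entity sentence → Spec_contain_entity sentence (contain_entity sentence)

-- ===== LEMMAS AND PROOFS =====

-- if c ∉ sub, a prefix of X ++ c :: Y cannot reach past X
lemma pv_prefix_append_cons {sub X Y : List Char} {c : Char}
    (hc : c ∉ sub) (h : sub <+: X ++ c :: Y) : sub <+: X := by
  by_cases hlen : sub.length ≤ X.length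
  · have htake : sub = (X ++ c :: Y).take sub.length := by
      obtain ⟨t, ht⟩ := h
      rw [← ht, List.take_left' rfl]
    rw [List.take_append_of_le_length hlen] at htake
    exact htake ▸ List.take_prefix _ _
  · exfalso
    have hx : X.length < sub.length := by omega
    have hg : sub[X.length] = (X ++ c :: Y)[X.length]'(by simp) :=
      h.getElem hx
    have hcc : (X ++ c :: Y)[X.length]'(by simp) = c := by
      rw [List.getElem_append_right (by omega)]
      simp
    rw [hcc] at hg
    exact hc (hg ▸ List.getElem_mem hx)

-- if c ∉ sub, an occurrence of sub in X ++ c :: Y lies wholly in X or wholly in Y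
lemma pv_infix_append_cons {sub X Y : List Char} {c : Char} (hc : c ∉ sub) :
    sub <:+: X ++ c :: Y ↔ sub <:+: X ∨ sub <:+: Y := by
  constructor
  · intro h
    induction X with
    | nil =>
      rw [List.nil_append, List.infix_cons_iff] at h
      rcases h with hp | hi
      · cases sub with
        | nil => exact Or.inl List.nil_infix
        | cons s0 ss =>
          rw [List.cons_prefix_cons] at hp
          exact absurd (hp.1 ▸ List.mem_cons_self) hc
      · exact Or.inr hi
    | cons x X ih =>
      rw [List.cons_append, List.infix_cons_iff] at h
      rcases h with hp | hi
      · exact Or.inl (pv_prefix_append_cons hc (by rwa [← List.cons_append] at hp)).isInfix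
      · rcases ih hi with h1 | h2
        · exact Or.inl (List.infix_cons h1)
        · exact Or.inr h2
  · rintro (h | h)
    · exact h.trans (List.prefix_append _ _).isInfix
    · exact h.trans ((List.suffix_cons c Y).trans (List.suffix_append _ _)).isInfix

lemma pv_isIn_append_cons (sub X Y : List Char) (c : Char) (hc : c ∉ sub) :
    PySem.Chars.isIn sub (X ++ c :: Y) = (PySem.Chars.isIn sub X || PySem.Chars.isIn sub Y) := by
  rw [Bool.eq_iff_iff]
  simp only [PySem.Chars.isIn_iff_infix, Bool.or_eq_true]
  exact pv_infix_append_cons hc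

lemma pv_isIn_nil (sub : List Char) (hne : sub ≠ []) : PySem.Chars.isIn sub [] = false := by
  rw [PySem.Chars.isIn_eq_false_iff]
  intro h
  exact hne (List.eq_nil_of_infix_nil h)

lemma pv_isIn_cons (sub Y : List Char) (c : Char) (hc : c ∉ sub) (hne : sub ≠ []) :
    PySem.Chars.isIn sub (c :: Y) = PySem.Chars.isIn sub Y := by
  have h := pv_isIn_append_cons sub [] Y c hc
  rw [List.nil_append, pv_isIn_nil sub hne, Bool.false_or] at h
  exact h

-- loop-level fact: some word produced by split₀.go contains sub  iff
-- sub occurs in the accumulator or in the remaining text cur.reverse ++ rest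
lemma pv_go_any (sub : List Char) (hne : sub ≠ [])
    (hws : ∀ c ∈ sub, PySem.Chars.isspace c = false) :
    ∀ rest cur acc, (PySem.Chars.split₀.go rest cur acc).any (fun w => PySem.Chars.isIn sub w)
      = (acc.any (fun w => PySem.Chars.isIn sub w) || PySem.Chars.isIn sub (cur.reverse ++ rest)) := by
  intro rest
  induction rest with
  | nil =>
    intro cur acc
    cases cur with
    | nil => simp [PySem.Chars.split₀.go, pv_isIn_nil sub hne]
    | cons a as => simp [PySem.Chars.split₀.go, Bool.or_comm]
  | cons c rest ih =>
    intro cur acc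
    by_cases hsp : PySem.Chars.isspace c = true
    · have hc : c ∉ sub := fun hmem => by
        have hf := hws c hmem; rw [hf] at hsp; exact Bool.false_ne_true hsp
      cases cur with
      | nil =>
        rw [show PySem.Chars.split₀.go (c :: rest) [] acc
              = PySem.Chars.split₀.go rest [] acc from by
            simp [PySem.Chars.split₀.go, hsp]]
        rw [ih [] acc]
        simp [pv_isIn_cons sub rest c hc hne]
      | cons a as =>
        rw [show PySem.Chars.split₀.go (c :: rest) (a :: as) acc
              = PySem.Chars.split₀.go rest [] ((a :: as).reverse :: acc) from by
            simp [PySem.Chars.split₀.go, hsp]]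
        rw [ih [] ((a :: as).reverse :: acc)]
        simp only [List.any_cons, List.reverse_nil, List.nil_append,
          pv_isIn_append_cons sub ((a :: as).reverse) rest c hc]
        simp [Bool.or_comm, Bool.or_left_comm]
    · rw [show PySem.Chars.split₀.go (c :: rest) cur acc
            = PySem.Chars.split₀.go rest (c :: cur) acc from by
          simp [PySem.Chars.split₀.go, hsp]]
      rw [ih (c :: cur) acc]
      simp

lemma pv_any_split₀ (sub : List Char) (s : String) (hne : sub ≠ [])
    (hws : ∀ c ∈ sub, PySem.Chars.isspace c = false) :
    (PySem.Str.split₀ s).any (fun w => PySem.Chars.isIn sub w.toList)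
      = PySem.Chars.isIn sub s.toList := by
  have h1 : (PySem.Str.split₀ s).any (fun w => PySem.Chars.isIn sub w.toList)
      = ((PySem.Str.split₀ s).map String.toList).any (fun w => PySem.Chars.isIn sub w) := by
    rw [List.any_map]; rfl
  rw [h1, PySem.Str.split₀_map_toList, PySem.Chars.split₀,
    pv_go_any sub hne hws s.toList [] []]
  simp

-- A's fold maintains exactly the two flags, for any two word tests p and q
lemma pv_fold_char (p q : String → Bool) (ws : List String) (c0 d0 : Bool) :
    ws.foldl (fun (st : Bool × Bool) word =>
      let st1 := if p word then (true, st.2) else st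
      if q word then (st1.1, true) else st1)
      (c0, d0)
    = (c0 || ws.any p, d0 || ws.any q) := by
  induction ws generalizing c0 d0 with
  | nil => simp
  | cons w ws ih =>
    cases hp : p w <;> cases hq : q w <;>
      simp [hp, hq, ih]

lemma pv_ws3 (x y z : Char) (hx : PySem.Chars.isspace x = false)
    (hy : PySem.Chars.isspace y = false) (hz : PySem.Chars.isspace z = false) :
    ∀ c ∈ [x, y, z], PySem.Chars.isspace c = false := by
  intro c hc
  simp only [List.mem_cons, List.not_mem_nil, or_false] at hc
  rcases hc with rfl | rfl | rfl <;> assumption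

-- ===== VERDICT (by name: the statement is the Claim_ definition above) =====
theorem contain_entity_spec : Claim_equal_contain_entity := by
  intro s _
  show contain_entity s = contain_entity_alt s
  simp only [contain_entity, contain_entity_alt]
  rw [pv_fold_char (fun w => PySem.Str.isIn "C_D" w || PySem.Str.isIn "C_C" w)
      (fun w => PySem.Str.isIn "D_D" w || PySem.Str.isIn "D_C" w)]
  have key : ∀ m : String, m.toList ≠ [] →
      (∀ c ∈ m.toList, PySem.Chars.isspace c = false) →
      (PySem.Str.split₀ s).any (fun w => PySem.Str.isIn m w) = PySem.Str.isIn m s := by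
    intro m hne hws
    have h := pv_any_split₀ m.toList s hne hws
    simpa using h
  have hany2 : ∀ m1 m2 : String,
      (PySem.Str.split₀ s).any (fun w => PySem.Str.isIn m1 w || PySem.Str.isIn m2 w)
      = ((PySem.Str.split₀ s).any (fun w => PySem.Str.isIn m1 w)
        || (PySem.Str.split₀ s).any (fun w => PySem.Str.isIn m2 w)) := by
    intro m1 m2
    rw [Bool.eq_iff_iff]
    simp only [List.any_eq_true, Bool.or_eq_true]
    constructor
    · rintro ⟨w, hw, h | h⟩
      · exact Or.inl ⟨w, hw, h⟩
      · exact Or.inr ⟨w, hw, h⟩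
    · rintro (⟨w, hw, h⟩ | ⟨w, hw, h⟩)
      · exact ⟨w, hw, Or.inl h⟩
      · exact ⟨w, hw, Or.inr h⟩
  rw [hany2, hany2,
    key "C_D" (by decide) (by rw [show "C_D".toList = ['C','_','D'] from by decide]; exact pv_ws3 _ _ _ rfl rfl rfl),
    key "C_C" (by decide) (by rw [show "C_C".toList = ['C','_','C'] from by decide]; exact pv_ws3 _ _ _ rfl rfl rfl),
    key "D_D" (by decide) (by rw [show "D_D".toList = ['D','_','D'] from by decide]; exact pv_ws3 _ _ _ rfl rfl rfl),
    key "D_C" (by decide) (by rw [show "D_C".toList = ['D','_','C'] from by decide]; exact pv_ws3 _ _ _ rfl rfl rfl)]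
  cases hc : (PySem.Str.isIn "C_D" s || PySem.Str.isIn "C_C" s) <;>
    cases hd : (PySem.Str.isIn "D_D" s || PySem.Str.isIn "D_C" s) <;> simp
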